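-- pv_equiv track=rewrite | github.com/hdPotato34/ukumog-engine | tests/test_rules.py | _transform_rows
-- ===== SOURCE A (Python) =====
-- def _transform_rows(rows: list[str], transform: str) -> list[str]:
--     if transform == "identity":
--         return list(rows)
--     if transform == "rot90":
--         size = len(rows)
--         return ["".join(rows[size - 1 - col][row] for col in range(size)) for row in range(size)]
--     if transform == "rot180":
--         return _transform_rows(_transform_rows(rows, "rot90"), "rot90")
--     if transform == "rot270":
--         return _transform_rows(_transform_rows(rows, "rot180"), "rot90")
--     if transform == "flip_h":
--         return [row[::-1] for row in rows]
--     raise ValueError(f"unknown transform: {transform}")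
-- ===== SOURCE B (Python) =====
-- def _by_index(rows, size, index):
--     return ["".join(rows[index(r, c)[0]][index(r, c)[1]] for c in range(size)) for r in range(size)]
--
--
-- def _transform_rows(rows: list[str], transform: str) -> list[str]:
--     if transform == "identity":
--         return list(rows)
--     if transform == "flip_h":
--         return [row[::-1] for row in rows]
--     size = len(rows)
--     if transform == "rot90":
--         return _by_index(rows, size, lambda r, c: (size - 1 - c, r))
--     if transform == "rot180":
--         return _by_index(rows, size, lambda r, c: (size - 1 - r, size - 1 - c))
--     if transform == "rot270":
--         return _by_index(rows, size, lambda r, c: (c, size - 1 - r))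
--     raise ValueError(f"unknown transform: {transform}")
-- ===== Notes on version B (the rewrite author's own statement) =====
-- stated objective: alternative
-- what changed: Replaces A's recursive composition (rot180 = rot90 twice, rot270 = rot180 then rot90) with one generic single-pass grid builder driven by a closed-form index map per rotation.
import Mathlib
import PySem

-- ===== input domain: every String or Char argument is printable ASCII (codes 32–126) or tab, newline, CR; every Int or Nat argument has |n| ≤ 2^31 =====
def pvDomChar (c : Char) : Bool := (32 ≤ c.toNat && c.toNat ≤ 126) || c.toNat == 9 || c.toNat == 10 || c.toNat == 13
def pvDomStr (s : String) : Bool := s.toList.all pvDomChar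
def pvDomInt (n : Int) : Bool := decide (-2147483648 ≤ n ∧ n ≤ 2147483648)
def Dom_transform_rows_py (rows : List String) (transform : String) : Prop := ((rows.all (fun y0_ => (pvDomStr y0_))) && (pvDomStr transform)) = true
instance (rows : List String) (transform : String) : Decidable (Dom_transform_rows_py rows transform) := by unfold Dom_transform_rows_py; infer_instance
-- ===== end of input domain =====

-- B replaces A's recursive rot90-composition with a single generic index-mapped pass per rotation (objective: alternative decomposition).

-- ===== PORT A =====
-- rows[i][j] (default ' ' is only reached outside Pre_, where Python raises IndexError)
def cellA (rows : List String) (i j : Int) : Char :=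
  (PySem.Str.pyGet? (PySem.List.pyGetD rows i "") j).getD ' '

-- A's rot90: ["".join(rows[size-1-col][row] for col in range(size)) for row in range(size)]
def rot90A (rows : List String) : List String :=
  let size : Int := rows.length
  (PySem.List.pyRange 0 size 1).map (fun row =>
    String.ofList ((PySem.List.pyRange 0 size 1).map (fun col =>
      cellA rows (size - 1 - col) row)))

-- A's recursion on the literal transform strings unfolded: rot180 = rot90∘rot90, rot270 = rot90∘rot180
def transform_rows_py (rows : List String) (transform : String) : List String :=
  if transform = "identity" then rows
  else if transform = "rot90" then rot90A rows
  else if transform = "rot180" then rot90A (rot90A rows)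
  else if transform = "rot270" then rot90A (rot90A (rot90A rows))
  else if transform = "flip_h" then rows.map (fun row => String.ofList row.toList.reverse)
  else []  -- raise ValueError: outside Pre_

-- ===== PORT B =====
-- Source B's _by_index: one generic pass, the cell picked by the index map
def byIndexB (rows : List String) (size : Int) (index : Int → Int → Int × Int) : List String :=
  (PySem.List.pyRange 0 size 1).map (fun r =>
    String.ofList ((PySem.List.pyRange 0 size 1).map (fun c =>
      cellA rows (index r c).1 (index r c).2)))

def transform_rows_py_alt (rows : List String) (transform : String) : List String :=
  if transform = "identity" then rows
  else if transform = "flip_h" then rows.map (fun row => String.ofList row.toList.reverse)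
  else
    let size : Int := rows.length
    if transform = "rot90" then byIndexB rows size (fun r c => (size - 1 - c, r))
    else if transform = "rot180" then byIndexB rows size (fun r c => (size - 1 - r, size - 1 - c))
    else if transform = "rot270" then byIndexB rows size (fun r c => (c, size - 1 - r))
    else []  -- raise ValueError: outside Pre_

-- ===== PRECONDITION & SPEC =====
-- A raises ValueError on any transform outside the five names, and IndexError on the three
-- rotations when some row is shorter than len(rows); exactly those inputs are excluded.
def Pre_transform_rows_py (rows : List String) (transform : String) : Prop :=
  transform = "identity" ∨ transform = "flip_h" ∨
  ((transform = "rot90" ∨ transform = "rot180" ∨ transform = "rot270") ∧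
    ∀ s ∈ rows, rows.length ≤ s.toList.length)
instance (rows : List String) (transform : String) : Decidable (Pre_transform_rows_py rows transform) := by unfold Pre_transform_rows_py; infer_instance

def pvWitness_transform_rows_py : List String × String := (["ab", "cd"], "rot180")

def Spec_transform_rows_py (rows : List String) (transform : String) (out : List String) : Prop := out = transform_rows_py_alt rows transform
instance (rows : List String) (transform : String) (out : List String) : Decidable (Spec_transform_rows_py rows transform out) := by unfold Spec_transform_rows_py; infer_instance

-- ===== CLAIM (what is proved, stated in full; the proofs are below) =====
def Claim_equal_transform_rows_py : Prop := ∀ (rows : List String) (transform : String), Dom_transform_rows_py rows transform → Pre_transform_rows_py rows transform → Spec_transform_rows_py rows transform (transform_rows_py rows transform)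

-- ===== LEMMAS AND PROOFS =====

-- Nat-indexed grid used to reason about both ports
def gridN (n : Nat) (f : Nat → Nat → Char) : List String :=
  (List.range n).map (fun r => String.ofList ((List.range n).map (fun c => f r c)))

theorem pygrid_eq (n : Nat) (f : Int → Int → Char) :
    (PySem.List.pyRange 0 (n : Int) 1).map (fun r =>
      String.ofList ((PySem.List.pyRange 0 (n : Int) 1).map (fun c => f r c)))
    = gridN n (fun r c => f r c) := by
  simp [PySem.List.pyRange_one, gridN, List.map_map, Function.comp_def]

theorem gridN_congr {n : Nat} {f g : Nat → Nat → Char}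
    (h : ∀ r < n, ∀ c < n, f r c = g r c) : gridN n f = gridN n g := by
  unfold gridN
  refine List.map_congr_left (fun r hr => ?_)
  rw [List.mem_range] at hr
  congr 1
  exact List.map_congr_left (fun c hc => h r hr c (List.mem_range.mp hc))

-- total Nat-level cell access
def cellN (rows : List String) (i j : Nat) : Char :=
  ((rows.getD i "").toList).getD j ' '

theorem cellA_natCast (rows : List String) (i j : Nat) :
    cellA rows (i : Int) (j : Int) = cellN rows i j := by
  simp [cellA, cellN, List.getD]

theorem cellN_gridN (n : Nat) (f : Nat → Nat → Char) (r c : Nat)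
    (hr : r < n) (hc : c < n) : cellN (gridN n f) r c = f r c := by
  unfold cellN gridN
  simp [List.getD, hr, hc]

theorem length_gridN (n : Nat) (f : Nat → Nat → Char) : (gridN n f).length = n := by
  simp [gridN]

theorem byIndexB_eq_gridN (rows : List String) (idx : Int → Int → Int × Int)
    (I : Nat → Nat → Nat × Nat)
    (h : ∀ r < rows.length, ∀ c < rows.length,
        idx (r : Int) (c : Int) = (((I r c).1 : Int), ((I r c).2 : Int))) :
    byIndexB rows (rows.length : Int) idx
      = gridN rows.length (fun r c => cellN rows (I r c).1 (I r c).2) := by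
  unfold byIndexB
  rw [pygrid_eq]
  refine gridN_congr (fun r hr c hc => ?_)
  rw [h r hr c hc]
  exact cellA_natCast rows _ _

theorem rot90A_eq_gridN (rows : List String) :
    rot90A rows = gridN rows.length (fun r c => cellN rows (rows.length - 1 - c) r) := by
  unfold rot90A
  rw [pygrid_eq]
  refine gridN_congr (fun r hr c hc => ?_)
  have : (rows.length : Int) - 1 - (c : Int) = ((rows.length - 1 - c : Nat) : Int) := by omega
  rw [this]
  exact cellA_natCast rows _ _

theorem rot90A_gridN (n : Nat) (f : Nat → Nat → Char) :
    rot90A (gridN n f) = gridN n (fun r c => f (n - 1 - c) r) := by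
  rw [rot90A_eq_gridN, length_gridN]
  exact gridN_congr (fun r hr c hc => cellN_gridN n f _ _ (by omega) hr)

-- the three rotation characterisations of A's side
theorem rotA_90 (rows : List String) :
    rot90A rows = gridN rows.length (fun r c => cellN rows (rows.length - 1 - c) r) :=
  rot90A_eq_gridN rows

theorem rotA_180 (rows : List String) :
    rot90A (rot90A rows)
      = gridN rows.length (fun r c => cellN rows (rows.length - 1 - r) (rows.length - 1 - c)) := by
  calc rot90A (rot90A rows)
      = rot90A (gridN rows.length (fun r c => cellN rows (rows.length - 1 - c) r)) :=
        congrArg rot90A (rotA_90 rows)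
    _ = gridN rows.length
          (fun r c => cellN rows (rows.length - 1 - r) (rows.length - 1 - c)) := by
        rw [rot90A_gridN]

theorem rotA_270 (rows : List String) :
    rot90A (rot90A (rot90A rows))
      = gridN rows.length (fun r c => cellN rows c (rows.length - 1 - r)) := by
  calc rot90A (rot90A (rot90A rows))
      = rot90A (gridN rows.length
          (fun r c => cellN rows (rows.length - 1 - r) (rows.length - 1 - c))) :=
        congrArg rot90A (rotA_180 rows)
    _ = gridN rows.length (fun r c => cellN rows c (rows.length - 1 - r)) := by
        rw [rot90A_gridN]
        exact gridN_congr (fun r hr c hc => by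
          congr 1
          omega)

-- ===== VERDICT (by name: the statement is the Claim_ definition above) =====
theorem transform_rows_py_spec : Claim_equal_transform_rows_py := by
  intro rows transform _ _
  unfold Spec_transform_rows_py transform_rows_py transform_rows_py_alt
  by_cases h1 : transform = "identity"
  · subst h1; simp only [String.reduceEq, reduceIte]
  by_cases h5 : transform = "flip_h"
  · subst h5; simp only [String.reduceEq, reduceIte]
  by_cases h2 : transform = "rot90"
  · subst h2; simp only [String.reduceEq, reduceIte]
    rw [rotA_90, byIndexB_eq_gridN rows _ (fun r c => (rows.length - 1 - c, r))
        (fun r hr c hc => by simp only [Prod.mk.injEq, and_true]; omega)]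
  by_cases h3 : transform = "rot180"
  · subst h3; simp only [String.reduceEq, reduceIte]
    rw [rotA_180, byIndexB_eq_gridN rows _ (fun r c => (rows.length - 1 - r, rows.length - 1 - c))
        (fun r hr c hc => by simp only [Prod.mk.injEq]; omega)]
  by_cases h4 : transform = "rot270"
  · subst h4; simp only [String.reduceEq, reduceIte]
    rw [rotA_270, byIndexB_eq_gridN rows _ (fun r c => (c, rows.length - 1 - r))
        (fun r hr c hc => by simp only [Prod.mk.injEq, true_and]; omega)]
  · simp [h1, h2, h3, h4, h5]
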